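-- pv_equiv track=rewrite | github.com/4lparslan/AI-Vote-Counter | identify_regions.py | getXCoord
-- ===== SOURCE A (Python) =====
-- def getXCoord(start_row):
--     longest_sequence = []
--     current_sequence = []
--     for i, num in enumerate(start_row):
--         if num == 255:
--             current_sequence.append(i)
--         else:
--             if len(current_sequence) > len(longest_sequence):
--                 longest_sequence = current_sequence.copy()
--             current_sequence = []
--     if len(current_sequence) > len(longest_sequence):
--         longest_sequence = current_sequence.copy()
--     start_index = longest_sequence[0]
--     end_index = start_index + len(longest_sequence) - 1
--     return (start_index + end_index) // 2
-- ===== SOURCE B (Python) =====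
-- def getXCoord(start_row):
--     # Single pass building the runs of 255s as (start, length) pairs, then pick
--     # the longest run (earliest wins) and compute its midpoint directly.
--     runs = []
--     for i, num in enumerate(start_row):
--         if num == 255:
--             if runs and runs[-1][0] + runs[-1][1] == i:
--                 runs[-1] = (runs[-1][0], runs[-1][1] + 1)
--             else:
--                 runs.append((i, 1))
--     start, length = max(runs, key=lambda r: r[1])
--     return start + (length - 1) // 2
-- ===== Notes on version B (the rewrite author's own statement) =====
-- stated objective: idiomatic
-- what changed: B replaces A's running longest/current index-list scan (with list copies) by a group-then-select decomposition: one pass builds the 255-runs as (start, length) pairs, then max(..., key=len) picks the earliest longest run and the midpoint is computed arithmetically.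
import Mathlib
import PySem

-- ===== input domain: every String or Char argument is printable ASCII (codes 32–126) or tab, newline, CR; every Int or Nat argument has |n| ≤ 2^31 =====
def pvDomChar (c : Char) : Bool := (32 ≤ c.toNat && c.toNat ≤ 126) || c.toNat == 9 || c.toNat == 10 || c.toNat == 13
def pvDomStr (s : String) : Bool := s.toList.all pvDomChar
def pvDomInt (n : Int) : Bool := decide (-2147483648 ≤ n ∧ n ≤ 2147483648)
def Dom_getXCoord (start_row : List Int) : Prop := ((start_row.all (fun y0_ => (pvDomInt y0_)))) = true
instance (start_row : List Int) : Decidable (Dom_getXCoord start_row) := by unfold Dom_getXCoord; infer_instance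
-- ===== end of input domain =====

-- B groups the row into (start, length) runs of 255s in one pass and then selects the
-- longest (earliest) run, instead of A's running longest/current index-list scan (idiomatic rewrite; same cost).

-- ===== PORT A =====
-- one loop iteration of A: state = (longest_sequence, current_sequence), input = (i, num)
def stepA (s : List Int × List Int) (p : Int × Int) : List Int × List Int :=
  if p.2 == 255 then (s.1, s.2 ++ [p.1])
  else if s.2.length > s.1.length then (s.2, ([] : List Int)) else (s.1, ([] : List Int))

def getXCoord (start_row : List Int) : Int :=
  let s := (PySem.List.enumerate start_row).foldl stepA ([], [])
  let longest := if s.2.length > s.1.length then s.2 else s.1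
  -- longest_sequence[0]: IndexError when longest is empty (no 255 in the row); those
  -- inputs are outside Pre_getXCoord, the .getD 0 default is never reached under it
  let start_index := longest.head?.getD 0
  let end_index := start_index + (longest.length : Int) - 1
  PySem.Int.floordiv (start_index + end_index) 2

-- ===== PORT B =====
-- one loop iteration of B: either extend the trailing run or open a new one
def stepB (runs : List (Int × Int)) (p : Int × Int) : List (Int × Int) :=
  if p.2 == 255 then
    match runs.getLast? with
    | some r => if r.1 + r.2 == p.1 then runs.dropLast ++ [(r.1, r.2 + 1)] else runs ++ [(p.1, 1)]
    | none => runs ++ [(p.1, 1)]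
  else runs

-- max(runs, key=lambda r: r[1]): first maximal element; ValueError on [] (outside Pre_)
def maxRun (runs : List (Int × Int)) : Int × Int :=
  match runs with
  | [] => (0, 0)
  | h :: t => t.foldl (fun b r => if r.2 > b.2 then r else b) h

def getXCoord_alt (start_row : List Int) : Int :=
  let b := maxRun ((PySem.List.enumerate start_row).foldl stepB [])
  b.1 + PySem.Int.floordiv (b.2 - 1) 2

-- ===== PRECONDITION & SPEC =====
-- Pre_ excludes exactly the rows containing no 255: there Python A raises IndexError
-- (longest_sequence[0] on the empty list) and Python B raises ValueError (max of empty).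
def Pre_getXCoord (start_row : List Int) : Prop := (255 : Int) ∈ start_row
instance (start_row : List Int) : Decidable (Pre_getXCoord start_row) := by unfold Pre_getXCoord; infer_instance

def pvWitness_getXCoord : List Int := [0, 255, 255, 0, 255]

def Spec_getXCoord (start_row : List Int) (out : Int) : Prop := out = getXCoord_alt start_row
instance (start_row : List Int) (out : Int) : Decidable (Spec_getXCoord start_row out) := by unfold Spec_getXCoord; infer_instance

-- ===== CLAIM (what is proved, stated in full; the proofs are below) =====
def Claim_equal_getXCoord : Prop := ∀ (start_row : List Int), Dom_getXCoord start_row → Pre_getXCoord start_row → Spec_getXCoord start_row (getXCoord start_row)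

-- ===== LEMMAS AND PROOFS =====

-- Invariant tying A's (longest, current) state at index m to B's runs list R:
-- R splits into the closed runs Rc (whose best is summarised by longest = L) plus,
-- when current = C is nonempty, the ongoing run (C.head, C.length) ending at m.
def RunInv (m : Int) (L C : List Int) (R : List (Int × Int)) : Prop :=
  ∃ Rc : List (Int × Int),
    ((C = [] ∧ R = Rc ∧ (∀ r ∈ R.getLast?, r.1 + r.2 < m))
      ∨ (C ≠ [] ∧ R = Rc ++ [(C.head?.getD 0, (C.length : Int))] ∧ C.head?.getD 0 + (C.length : Int) = m))
    ∧ (Rc = [] → L = [])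
    ∧ (Rc ≠ [] → L ≠ [] ∧ L.head?.getD 0 = (maxRun Rc).1 ∧ (L.length : Int) = (maxRun Rc).2)

lemma maxRun_concat (R : List (Int × Int)) (x : Int × Int) (h : R ≠ []) :
    maxRun (R ++ [x]) = if x.2 > (maxRun R).2 then x else maxRun R := by
  match R with
  | a :: t => simp [maxRun, List.foldl_append]

lemma fd2 (a x : Int) : PySem.Int.floordiv (2 * a + x) 2 = a + PySem.Int.floordiv x 2 := by
  rw [PySem.Int.floordiv_eq_ediv_of_pos (by norm_num), PySem.Int.floordiv_eq_ediv_of_pos (by norm_num)]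
  omega

lemma step_inv (m v : Int) (L C : List Int) (R : List (Int × Int)) (h : RunInv m L C R) :
    RunInv (m + 1) (stepA (L, C) (m, v)).1 (stepA (L, C) (m, v)).2 (stepB R (m, v)) := by
  obtain ⟨Rc, hdisj, hRcE, hRcN⟩ := h
  by_cases hv : v = 255
  · -- num == 255: A appends m to current, B extends or opens a run
    subst hv
    have hA1 : (stepA (L, C) (m, (255 : Int))).1 = L := by simp [stepA]
    have hA2 : (stepA (L, C) (m, (255 : Int))).2 = C ++ [m] := by simp [stepA]
    rw [hA1, hA2]
    rcases hdisj with ⟨hC, hR, hlast⟩ | ⟨hC, hR, hend⟩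
    · -- current empty: B appends a new run (m, 1)
      subst hC
      have hB : stepB R (m, (255 : Int)) = R ++ [(m, 1)] := by
        cases hlst : R.getLast? with
        | none => simp [stepB, hlst]
        | some r =>
          have hlt := hlast r hlst
          have hne : (r.1 + r.2 == m) = false := by simp; omega
          simp [stepB, hlst, hne]
      rw [hB, hR]
      refine ⟨Rc, Or.inr ⟨by simp, by simp, by simp⟩, hRcE, hRcN⟩
    · -- current nonempty: B extends the trailing run
      obtain ⟨c, cs, rfl⟩ : ∃ c cs, C = c :: cs := by
        cases C with
        | nil => exact absurd rfl hC
        | cons c cs => exact ⟨c, cs, rfl⟩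
      simp only [List.head?_cons, Option.getD_some, List.length_cons] at hR hend
      push_cast at hend
      have hB : stepB R (m, (255 : Int))
          = Rc ++ [(((c :: cs) ++ [m]).head?.getD 0, (((c :: cs) ++ [m]).length : Int))] := by
        rw [hR]
        simp [stepB, List.length_cons]
        omega
      refine ⟨Rc, Or.inr ⟨by simp, hB, ?_⟩, hRcE, hRcN⟩
      simp only [List.cons_append, List.head?_cons, Option.getD_some, List.length_cons,
        List.length_append, List.length_nil]
      push_cast
      omega
  · -- num != 255: A closes the current run, B leaves runs unchanged
    have hB : stepB R (m, v) = R := by simp [stepB, hv]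
    rw [hB]
    have hA : stepA (L, C) (m, v) = (if C.length > L.length then C else L, ([] : List Int)) := by
      show (if ((m, v).2 == 255) = true then (L, C ++ [(m, v).1])
        else if C.length > L.length then (C, ([] : List Int)) else (L, ([] : List Int))) = _
      rw [show ((m, v).2 == 255) = false from by simp [hv]]
      simp only [Bool.false_eq_true, if_false]
      by_cases hgt : C.length > L.length
      · rw [if_pos hgt, if_pos hgt]
      · rw [if_neg hgt, if_neg hgt]
    rw [hA]
    rcases hdisj with ⟨hC, hR, hlast⟩ | ⟨hC, hR, hend⟩
    · -- nothing to close
      subst hC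
      have hif : (if ([] : List Int).length > L.length then ([] : List Int) else L) = L := by
        simp
      rw [hif]
      refine ⟨Rc, Or.inl ⟨rfl, hR, ?_⟩, hRcE, hRcN⟩
      intro r hr
      have := hlast r hr
      omega
    · -- close the run (c, len C); the new closed-run list is R itself
      obtain ⟨c, cs, rfl⟩ : ∃ c cs, C = c :: cs := by
        cases C with
        | nil => exact absurd rfl hC
        | cons c cs => exact ⟨c, cs, rfl⟩
      simp only [List.head?_cons, Option.getD_some] at hR hend
      refine ⟨R, Or.inl ⟨rfl, rfl, ?_⟩, ?_, ?_⟩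
      · intro r hr
        rw [hR, List.getLast?_concat] at hr
        simp only [Option.mem_some_iff] at hr
        subst hr
        simp only
        omega
      · intro hRnil
        rw [hR] at hRnil
        exact absurd hRnil (by simp)
      · intro _
        rw [hR]
        by_cases hRc : Rc = []
        · -- first closed run: current beats the empty longest
          subst hRc
          have hL : L = [] := hRcE rfl
          subst hL
          have hif : (if (c :: cs).length > ([] : List Int).length then c :: cs else ([] : List Int)) = c :: cs := by
            simp
          rw [hif]
          exact ⟨by simp, by simp [maxRun], by simp [maxRun]⟩
        · obtain ⟨hLne, hLh, hLl⟩ := hRcN hRc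
          rw [maxRun_concat Rc _ hRc]
          by_cases hgt : (c :: cs).length > L.length
          · have hgt' : ((c, ((c :: cs).length : Int)).2 > (maxRun Rc).2) := by
              simp only
              rw [← hLl]
              exact_mod_cast hgt
            rw [if_pos hgt, if_pos hgt']
            exact ⟨by simp, by simp, by simp⟩
          · have hgt' : ¬ ((c, ((c :: cs).length : Int)).2 > (maxRun Rc).2) := by
              simp only
              rw [← hLl]
              exact_mod_cast hgt
            rw [if_neg hgt, if_neg hgt']
            exact ⟨hLne, hLh, hLl⟩

lemma fold_inv (xs : List Int) : ∀ (m : Int) (L C : List Int) (R : List (Int × Int)),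
    RunInv m L C R →
    RunInv (m + xs.length)
      (((PySem.List.enumerate xs m).foldl stepA (L, C)).1)
      (((PySem.List.enumerate xs m).foldl stepA (L, C)).2)
      ((PySem.List.enumerate xs m).foldl stepB R) := by
  induction xs with
  | nil => intro m L C R h; simpa [PySem.List.enumerate_nil] using h
  | cons x xs ih =>
    intro m L C R h
    rw [PySem.List.enumerate_cons]
    simp only [List.foldl_cons]
    have h1 := step_inv m x L C R h
    have h2 := ih (m + 1) (stepA (L, C) (m, x)).1 (stepA (L, C) (m, x)).2 (stepB R (m, x)) h1
    have hlen : m + ((x :: xs).length : Int) = (m + 1) + (xs.length : Int) := by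
      simp only [List.length_cons]
      push_cast
      ring
    rw [hlen]
    exact h2

lemma inv_final (m : Int) (L C : List Int) (R : List (Int × Int)) (h : RunInv m L C R) :
    PySem.Int.floordiv
      (((if C.length > L.length then C else L).head?.getD 0)
        + (((if C.length > L.length then C else L).head?.getD 0)
            + (((if C.length > L.length then C else L).length : Nat) : Int) - 1)) 2
    = (maxRun R).1 + PySem.Int.floordiv ((maxRun R).2 - 1) 2 := by
  obtain ⟨Rc, hdisj, hRcE, hRcN⟩ := h
  have key : ∀ (s len : Int),
      PySem.Int.floordiv (s + (s + len - 1)) 2 = s + PySem.Int.floordiv (len - 1) 2 := by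
    intro s len
    have h2 : s + (s + len - 1) = 2 * s + (len - 1) := by ring
    rw [h2, fd2]
  rcases hdisj with ⟨hC, hR, -⟩ | ⟨hC, hR, -⟩
  · subst hC
    rw [hR]
    have hif : (if ([] : List Int).length > L.length then ([] : List Int) else L) = L := by simp
    rw [hif]
    by_cases hRc : Rc = []
    · subst hRc
      have hL : L = [] := hRcE rfl
      subst hL
      simp [maxRun]
    · obtain ⟨hLne, hLh, hLl⟩ := hRcN hRc
      rw [key, hLh, hLl]
  · obtain ⟨c, cs, rfl⟩ : ∃ c cs, C = c :: cs := by
      cases C with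
      | nil => exact absurd rfl hC
      | cons c cs => exact ⟨c, cs, rfl⟩
    simp only [List.head?_cons, Option.getD_some] at hR
    rw [hR]
    by_cases hRc : Rc = []
    · subst hRc
      have hL : L = [] := hRcE rfl
      subst hL
      have hif : (if (c :: cs).length > ([] : List Int).length then c :: cs else ([] : List Int)) = c :: cs := by
        simp
      rw [hif]
      simp only [List.nil_append, maxRun, List.head?_cons, Option.getD_some]
      rw [key]
      simp [List.foldl_nil]
    · obtain ⟨hLne, hLh, hLl⟩ := hRcN hRc
      rw [maxRun_concat Rc _ hRc]
      by_cases hgt : (c :: cs).length > L.length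
      · have hgt' : ((c, ((c :: cs).length : Int)).2 > (maxRun Rc).2) := by
          simp only
          rw [← hLl]
          exact_mod_cast hgt
        rw [if_pos hgt, if_pos hgt']
        simp only [List.head?_cons, Option.getD_some]
        rw [key]
      · have hgt' : ¬ ((c, ((c :: cs).length : Int)).2 > (maxRun Rc).2) := by
          simp only
          rw [← hLl]
          exact_mod_cast hgt
        rw [if_neg hgt, if_neg hgt']
        rw [key, hLh, hLl]

lemma ports_agree (start_row : List Int) : getXCoord start_row = getXCoord_alt start_row := by
  have h0 : RunInv 0 ([] : List Int) ([] : List Int) ([] : List (Int × Int)) :=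
    ⟨[], Or.inl ⟨rfl, rfl, by simp⟩, fun _ => rfl, fun h => absurd rfl h⟩
  have h := fold_inv start_row 0 [] [] [] h0
  simp only [Int.zero_add] at h
  unfold getXCoord getXCoord_alt
  exact inv_final _ _ _ _ h

-- ===== VERDICT (by name: the statement is the Claim_ definition above) =====
theorem getXCoord_spec : Claim_equal_getXCoord := by
  intro start_row _ _
  unfold Spec_getXCoord
  exact ports_agree start_row
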